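-- pv_equiv track=rewrite | github.com/duckwilly/cesop | app/services/pipeline_service.py | pick_licensed_countries
-- ===== SOURCE A (Python) =====
-- EU_MEMBER_STATES = [
--     "AT",
--     "BE",
--     "BG",
--     "HR",
--     "CY",
--     "CZ",
--     "DK",
--     "EE",
--     "FI",
--     "FR",
--     "DE",
--     "GR",
--     "HU",
--     "IE",
--     "IT",
--     "LV",
--     "LT",
--     "LU",
--     "MT",
--     "NL",
--     "PL",
--     "PT",
--     "RO",
--     "SK",
--     "SI",
--     "ES",
--     "SE",
-- ]
--
-- EU_MEMBER_STATE_SET = set(EU_MEMBER_STATES)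
--
-- def pick_licensed_countries(countries: list[str], desired: int) -> list[str]:
--     if desired <= 0:
--         return []
--
--     selected: list[str] = []
--     for code in countries:
--         if not code:
--             continue
--         normalized = code.strip().upper()
--         if normalized in EU_MEMBER_STATE_SET and normalized not in selected:
--             selected.append(normalized)
--
--     if len(selected) < desired:
--         for code in EU_MEMBER_STATES:
--             if len(selected) >= desired:
--                 break
--             if code not in selected:
--                 selected.append(code)
--
--     return selected[:desired]
-- ===== SOURCE B (Python) =====
-- EU_MEMBER_STATES = [
--     "AT", "BE", "BG", "HR", "CY", "CZ", "DK", "EE", "FI", "FR", "DE", "GR",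
--     "HU", "IE", "IT", "LV", "LT", "LU", "MT", "NL", "PL", "PT", "RO", "SK",
--     "SI", "ES", "SE",
-- ]
--
--
-- def pick_licensed_countries(countries: list[str], desired: int) -> list[str]:
--     if desired <= 0:
--         return []
--     n = len(countries)
--     # rank every EU code: unseen codes rank n + their EU-list position
--     rank = {code: n + j for j, code in enumerate(EU_MEMBER_STATES)}
--     for i, raw in enumerate(countries):
--         if raw:
--             code = raw.strip().upper()
--             if rank.get(code, -1) >= n:  # an EU code not yet seen
--                 rank[code] = i
--     return sorted(EU_MEMBER_STATES, key=rank.get)[:desired]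
-- ===== Notes on version B (the rewrite author's own statement) =====
-- stated objective: alternative
-- what changed: Replaced A's select-then-pad two-loop construction (each with a 'not in selected' scan and an early break) by a rank-and-sort algorithm: assign every EU code a rank (index of its first valid occurrence in the input, else n + its position in EU_MEMBER_STATES) and return EU_MEMBER_STATES sorted by rank, truncated to desired.
import Mathlib
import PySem

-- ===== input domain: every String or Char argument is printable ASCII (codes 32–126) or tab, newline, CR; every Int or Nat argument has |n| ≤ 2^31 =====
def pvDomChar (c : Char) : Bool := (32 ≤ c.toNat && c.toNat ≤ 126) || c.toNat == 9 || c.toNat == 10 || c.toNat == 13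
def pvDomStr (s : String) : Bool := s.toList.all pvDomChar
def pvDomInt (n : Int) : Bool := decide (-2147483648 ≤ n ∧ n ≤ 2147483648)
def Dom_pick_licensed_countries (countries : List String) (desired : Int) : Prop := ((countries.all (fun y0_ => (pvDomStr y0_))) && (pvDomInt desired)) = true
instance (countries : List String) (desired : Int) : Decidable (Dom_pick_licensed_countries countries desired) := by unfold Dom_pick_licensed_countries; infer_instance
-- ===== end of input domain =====

-- B replaces A's select loop + breaking pad loop by a rank-and-sort: every EU code gets a rank
-- (first valid occurrence index in the input, else n + its EU-list position) and the EU list is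
-- sorted by rank and truncated (alternative algorithm; same result, no speed claim).

-- shared module constants
def pvEU : List String :=
  ["AT", "BE", "BG", "HR", "CY", "CZ", "DK", "EE", "FI", "FR", "DE", "GR",
   "HU", "IE", "IT", "LV", "LT", "LU", "MT", "NL", "PL", "PT", "RO", "SK",
   "SI", "ES", "SE"]

def pvEUSet : PySem.Set String := PySem.Set.ofList pvEU

-- code.strip().upper()
def pvNorm (c : String) : String := PySem.Str.upper (PySem.Str.strip c)

-- ===== PORT A =====
-- the first loop of A: build `selected` over `countries`
def pvSelect (sel : List String) : List String → List String
  | [] => sel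
  | code :: rest =>
      if code = "" then pvSelect sel rest
      else
        let normalized := pvNorm code
        if PySem.Set.contains pvEUSet normalized ∧ ¬ normalized ∈ sel then
          pvSelect (sel ++ [normalized]) rest
        else pvSelect sel rest

-- the second loop of A: pad from EU_MEMBER_STATES, breaking when len(selected) >= desired
def pvPad (desired : Int) (sel : List String) : List String → List String
  | [] => sel
  | code :: rest =>
      if desired ≤ PySem.List.len sel then sel
      else if code ∈ sel then pvPad desired sel rest
      else pvPad desired (sel ++ [code]) rest

def pick_licensed_countries (countries : List String) (desired : Int) : List String :=
  if desired ≤ 0 then []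
  else
    let selected := pvSelect [] countries
    let selected :=
      if PySem.List.len selected < desired then pvPad desired selected pvEU else selected
    PySem.List.slice selected none (some desired)

-- ===== PORT B =====
-- rank = {code: n + j for j, code in enumerate(EU_MEMBER_STATES)}
def pvRankInit (n : Int) : PySem.Dict String Int :=
  (PySem.List.enumerate pvEU).foldl (fun d p => d.insert p.2 (n + p.1)) PySem.Dict.empty

-- the loop: for i, raw in enumerate(countries): if raw: … if rank.get(code,-1) >= n: rank[code] = i
def pvRank (n : Int) (countries : List String) : PySem.Dict String Int :=
  (PySem.List.enumerate countries).foldl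
    (fun d p =>
      if p.2 ≠ "" then
        let code := pvNorm p.2
        if n ≤ d.getD code (-1) then d.insert code p.1 else d
      else d)
    (pvRankInit n)

def pick_licensed_countries_alt (countries : List String) (desired : Int) : List String :=
  if desired ≤ 0 then []
  else
    let n : Int := PySem.List.len countries
    let rank := pvRank n countries
    -- key=rank.get: every EU code is a key of rank, so .get returns its value (getD's default unused)
    PySem.List.slice (PySem.List.sorted pvEU (fun c => rank.getD c (-1)) false) none (some desired)

-- ===== PRECONDITION & SPEC =====
def Spec_pick_licensed_countries (countries : List String) (desired : Int) (out : List String) : Prop := out = pick_licensed_countries_alt countries desired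
instance (countries : List String) (desired : Int) (out : List String) : Decidable (Spec_pick_licensed_countries countries desired out) := by unfold Spec_pick_licensed_countries; infer_instance

-- ===== CLAIM (what is proved, stated in full; the proofs are below) =====
def Claim_equal_pick_licensed_countries : Prop := ∀ (countries : List String) (desired : Int), Dom_pick_licensed_countries countries desired → Spec_pick_licensed_countries countries desired (pick_licensed_countries countries desired)

-- ===== LEMMAS AND PROOFS =====

theorem pvEU_nodup : pvEU.Nodup := by decide

theorem pvEU_idxOf_pairwise :
    pvEU.Pairwise (fun a b => ((pvEU.idxOf a : Nat) : Int) < ((pvEU.idxOf b : Nat) : Int)) := by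
  decide

theorem pvEUSet_eq : pvEUSet = pvEU := by decide

-- the invariant tying A's `selected` to B's `rank` dict while both loops walk `countries`
def pvInv (n : Int) (sel : List String) (d : PySem.Dict String Int) (i : Int) : Prop :=
  (∀ c, c ∈ sel ↔ c ∈ pvEU ∧ d.getD c (-1) < n) ∧
  sel.Pairwise (fun a b => d.getD a (-1) < d.getD b (-1)) ∧
  (∀ c ∈ sel, d.getD c (-1) < i) ∧
  (∀ c ∈ pvEU, c ∉ sel → d.getD c (-1) = n + (pvEU.idxOf c : Int)) ∧
  (∀ c, c ∉ pvEU → d.getD c (-1) = -1)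

-- the initial rank dict maps every EU code to n + its position and everything else to the default
theorem pvRankInit_getD_aux (n : Int) (l : List String) (hnd : l.Nodup)
    (d : PySem.Dict String Int) (s : Int) (c : String) :
    ((PySem.List.enumerate l s).foldl (fun d p => d.insert p.2 (n + p.1)) d).getD c (-1) =
      if c ∈ l then n + s + (l.idxOf c : Int) else d.getD c (-1) := by
  induction l generalizing d s with
  | nil => simp [PySem.List.enumerate_nil]
  | cons x rest ih =>
      rcases List.nodup_cons.mp hnd with ⟨hx, hrest⟩
      rw [PySem.List.enumerate_cons]
      simp only [List.foldl_cons]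
      rw [ih hrest]
      by_cases hc : c = x
      · subst hc
        have : c ∉ rest := hx
        simp [this]
      · by_cases hm : c ∈ rest
        · have hidx : ((x :: rest).idxOf c : Int) = (rest.idxOf c : Int) + 1 := by
            have hxc : (x == c) = false := by simpa using Ne.symm hc
            simp [List.idxOf_cons, hxc]
          simp [hm, hc, hidx]
          ring
        · have : c ∉ x :: rest := by simp [hc, hm]
          simp [hm, this, PySem.Dict.getD_insert, hc]

theorem pvRankInit_getD (n : Int) (c : String) :
    (pvRankInit n).getD c (-1) =
      if c ∈ pvEU then n + (pvEU.idxOf c : Int) else -1 := by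
  unfold pvRankInit
  rw [pvRankInit_getD_aux n pvEU pvEU_nodup PySem.Dict.empty 0 c]
  simp [PySem.Dict.getD_empty]

theorem pvInv_init (n : Int) : pvInv n [] (pvRankInit n) 0 := by
  refine ⟨?_, ?_, ?_, ?_, ?_⟩
  · intro c
    simp only [List.not_mem_nil, false_iff]
    rintro ⟨hc, hlt⟩
    rw [pvRankInit_getD, if_pos hc] at hlt
    have : (0 : Int) ≤ (pvEU.idxOf c : Int) := Int.natCast_nonneg _
    omega
  · exact List.Pairwise.nil
  · intro c hc; simp at hc
  · intro c hc _; rw [pvRankInit_getD, if_pos hc]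
  · intro c hc; rw [pvRankInit_getD, if_neg hc]

-- the joint step: walking `rest` preserves the invariant
theorem pvInv_step (n : Int) (rest : List String) :
    ∀ (sel : List String) (d : PySem.Dict String Int) (i : Int),
      0 ≤ i → i + (rest.length : Int) ≤ n → pvInv n sel d i →
      pvInv n (pvSelect sel rest)
        ((PySem.List.enumerate rest i).foldl
          (fun d p =>
            if p.2 ≠ "" then
              let code := pvNorm p.2
              if n ≤ d.getD code (-1) then d.insert code p.1 else d
            else d) d)
        (i + (rest.length : Int)) := by
  induction rest with
  | nil => intro sel d i _ _ h; simpa [pvSelect, PySem.List.enumerate_nil] using h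
  | cons raw rest ih =>
      intro sel d i hi0 hin hInv
      obtain ⟨H1, H2, H3, H4, H5⟩ := hInv
      rw [PySem.List.enumerate_cons]
      simp only [List.foldl_cons, List.length_cons]
      have hlen : i + ((rest.length : Int) + 1) ≤ n := by
        simp only [List.length_cons] at hin
        push_cast at hin ⊢
        omega
      have hin' : (i + 1) + (rest.length : Int) ≤ n := by omega
      have harr : i + (((rest.length : Nat) + 1 : Nat) : Int) = (i + 1) + (rest.length : Int) := by
        push_cast; ring
      rw [harr]
      by_cases hraw : raw = ""
      · -- skipped by both loops
        have hA : pvSelect sel (raw :: rest) = pvSelect sel rest := by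
          simp [pvSelect, hraw]
        rw [hA]
        simp only [hraw, ne_eq, not_true_eq_false, if_false]
        exact ih sel d (i + 1) (by omega) hin'
          ⟨H1, H2, fun c hc => lt_trans (H3 c hc) (by omega), H4, H5⟩
      · set c0 := pvNorm raw with hc0
        by_cases heu : c0 ∈ pvEU
        · by_cases hsel : c0 ∈ sel
          · -- already selected: both skip
            have hA : pvSelect sel (raw :: rest) = pvSelect sel rest := by
              rw [pvSelect]
              simp only [hraw, if_false, pvEUSet_eq]
              simp only [PySem.Set.contains_eq_listContains, List.contains_iff_mem]
              exact if_neg (fun h => h.2 (hc0 ▸ hsel))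
            have hlt : d.getD c0 (-1) < n := ((H1 c0).mp hsel).2
            have hB : ¬ n ≤ d.getD c0 (-1) := by omega
            rw [hA]
            simp only [hraw, ne_eq, not_false_eq_true, if_true, hB, if_false]
            exact ih sel d (i + 1) (by omega) hin'
              ⟨H1, H2, fun c hc => lt_trans (H3 c hc) (by omega), H4, H5⟩
          · -- fresh valid EU code: A appends, B records index i
            have hA : pvSelect sel (raw :: rest) = pvSelect (sel ++ [c0]) rest := by
              rw [pvSelect]
              simp only [hraw, if_false, pvEUSet_eq]
              simp only [PySem.Set.contains_eq_listContains, List.contains_iff_mem]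
              exact if_pos ⟨hc0 ▸ heu, hc0 ▸ hsel⟩
            have hge : d.getD c0 (-1) = n + (pvEU.idxOf c0 : Int) := H4 c0 heu hsel
            have hB : n ≤ d.getD c0 (-1) := by
              have h0 : (0 : Int) ≤ (pvEU.idxOf c0 : Int) := Int.natCast_nonneg _
              omega
            have hiltn : i < n := by omega
            have hkey : ∀ c, (d.insert c0 i).getD c (-1) = if c = c0 then i else d.getD c (-1) :=
              fun c => by rw [PySem.Dict.getD_insert]
            rw [hA]
            simp only [hraw, ne_eq, not_false_eq_true, if_true, hB, if_true]
            refine ih (sel ++ [c0]) (d.insert c0 i) (i + 1) (by omega) hin' ⟨?_, ?_, ?_, ?_, ?_⟩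
            · intro c
              rw [hkey c]
              by_cases hc : c = c0
              · subst hc
                simp [heu, hiltn]
              · simp only [List.mem_append, List.mem_singleton, hc, or_false]
                exact H1 c
            · rw [List.pairwise_append]
              refine ⟨?_, List.pairwise_singleton _ _, ?_⟩
              · refine H2.imp_of_mem ?_
                intro a b ha hb hab
                have hane : a ≠ c0 := fun h => hsel (h ▸ ha)
                have hbne : b ≠ c0 := fun h => hsel (h ▸ hb)
                rw [hkey a, hkey b, if_neg hane, if_neg hbne]
                exact hab
              · intro a ha b hb
                rw [List.mem_singleton] at hb
                subst hb
                have hane : a ≠ c0 := fun h => hsel (h ▸ ha)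
                rw [hkey a, hkey c0, if_neg hane, if_pos rfl]
                exact H3 a ha
            · intro c hc
              rw [hkey c]
              rcases List.mem_append.mp hc with h | h
              · have hne : c ≠ c0 := fun he => hsel (he ▸ h)
                rw [if_neg hne]
                have := H3 c h
                omega
              · rw [List.mem_singleton] at h
                subst h
                rw [if_pos rfl]
                omega
            · intro c hceu hcn
              have hne : c ≠ c0 := fun he => hcn (by simp [he])
              rw [hkey c, if_neg hne]
              exact H4 c hceu (fun h => hcn (List.mem_append.mpr (Or.inl h)))
            · intro c hceu
              have hne : c ≠ c0 := fun he => hceu (he ▸ heu)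
              rw [hkey c, if_neg hne]
              exact H5 c hceu
        · -- not an EU code: both skip; B's getD is -1
          have hA : pvSelect sel (raw :: rest) = pvSelect sel rest := by
            rw [pvSelect]
            simp only [hraw, if_false, pvEUSet_eq]
            simp only [PySem.Set.contains_eq_listContains, List.contains_iff_mem]
            exact if_neg (fun h => heu (hc0 ▸ h.1))
          have hB : ¬ n ≤ d.getD c0 (-1) := by
            rw [H5 c0 heu]; omega
          rw [hA]
          simp only [hraw, ne_eq, not_false_eq_true, if_true, hB, if_false]
          exact ih sel d (i + 1) (by omega) hin'
            ⟨H1, H2, fun c hc => lt_trans (H3 c hc) (by omega), H4, H5⟩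

-- A's pad loop, truncated to desired, is the truncated append of the fresh EU codes
theorem pvPad_take (desired : Int) (eu : List String) (sel : List String) (hnd : eu.Nodup) :
    (pvPad desired sel eu).take desired.toNat =
      (sel ++ eu.filter (fun c => ¬ c ∈ sel)).take desired.toNat := by
  induction eu generalizing sel with
  | nil => simp [pvPad]
  | cons c rest ih =>
      rcases List.nodup_cons.mp hnd with ⟨hc, hrest⟩
      by_cases hbreak : desired ≤ PySem.List.len sel
      · have hbreak' : desired ≤ (sel.length : Int) := by
          simpa [PySem.List.len_eq] using hbreak
        have hlen : desired.toNat ≤ sel.length := by omega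
        simp [pvPad, hbreak', List.take_append, Nat.sub_eq_zero_of_le hlen]
      · have hbreak' : ¬ desired ≤ (sel.length : Int) := by
          simpa [PySem.List.len_eq] using hbreak
        by_cases hs : c ∈ sel
        · rw [show pvPad desired sel (c :: rest) = pvPad desired sel rest from by
            simp [pvPad, hbreak', hs], ih _ hrest]
          simp [hs]
        · rw [show pvPad desired sel (c :: rest) = pvPad desired (sel ++ [c]) rest from by
            simp [pvPad, hbreak', hs], ih _ hrest]
          have hf : rest.filter (fun z => decide (¬ z ∈ sel ++ [c]))
              = rest.filter (fun z => decide (¬ z ∈ sel)) := by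
            apply List.filter_congr
            intro z hz
            have hzc : z ≠ c := fun h => hc (h ▸ hz)
            simp [hzc]
          simp only [hf]
          simp [hs]

-- ===== VERDICT (by name: the statement is the Claim_ definition above) =====
theorem pick_licensed_countries_spec : Claim_equal_pick_licensed_countries := by
  intro countries desired _
  unfold Spec_pick_licensed_countries pick_licensed_countries pick_licensed_countries_alt
  by_cases hd : desired ≤ 0
  · simp [hd]
  · simp only [hd, if_false]
    have h0 : (0:Int) ≤ desired := by omega
    set n : Int := PySem.List.len countries with hn
    have hnlen : n = (countries.length : Int) := by rw [hn, PySem.List.len_eq]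
    have hInv := pvInv_step n countries [] (pvRankInit n) 0 le_rfl (by omega)
      (pvInv_init n)
    rw [show ((PySem.List.enumerate countries 0).foldl
          (fun d p =>
            if p.2 ≠ "" then
              let code := pvNorm p.2
              if n ≤ d.getD code (-1) then d.insert code p.1 else d
            else d) (pvRankInit n)) = pvRank n countries from rfl] at hInv
    obtain ⟨H1, H2, H3, H4, H5⟩ := hInv
    set sel := pvSelect [] countries with hsel
    set d := pvRank n countries with hdd
    have hselnd : sel.Nodup := H2.imp (fun h => by rintro rfl; exact lt_irrefl _ h)
    have hselsub : ∀ c ∈ sel, c ∈ pvEU := fun c hc => ((H1 c).mp hc).1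
    -- the sorted EU list is exactly: selected codes (in order), then the fresh EU codes
    have hsorted : PySem.List.sorted pvEU (fun c => d.getD c (-1)) false =
        sel ++ pvEU.filter (fun c => ¬ c ∈ sel) := by
      apply PySem.List.sorted_eq_of_perm_of_pairwise_lt
      · rw [List.perm_ext_iff_of_nodup ?_ pvEU_nodup]
        · intro c
          simp only [List.mem_append, List.mem_filter, decide_not, Bool.not_eq_true',
            decide_eq_false_iff_not]
          constructor
          · rintro (h | ⟨h, _⟩)
            · exact hselsub c h
            · exact h
          · intro h
            by_cases hc : c ∈ sel
            · exact Or.inl hc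
            · exact Or.inr ⟨h, hc⟩
        · refine List.Nodup.append hselnd (pvEU_nodup.filter _) ?_
          intro c hc hcf
          rw [List.mem_filter] at hcf
          revert hcf
          simp [hc]
      · rw [List.pairwise_append]
        refine ⟨H2, ?_, ?_⟩
        · have hp := (pvEU_idxOf_pairwise.sublist (List.filter_sublist
            (p := fun c => decide (¬ c ∈ sel))))
          refine hp.imp_of_mem ?_
          intro a b ha hb hab
          rw [List.mem_filter] at ha hb
          have ha' := H4 a ha.1 (by simpa using ha.2)
          have hb' := H4 b hb.1 (by simpa using hb.2)
          rw [ha', hb']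
          omega
        · intro a ha b hb
          rw [List.mem_filter] at hb
          have hlt : d.getD a (-1) < n := ((H1 a).mp ha).2
          have hb' := H4 b hb.1 (by simpa using hb.2)
          rw [hb']
          have h0b : (0:Int) ≤ (pvEU.idxOf b : Int) := Int.natCast_nonneg _
          omega
    rw [hsorted, PySem.List.slice_to _ h0, PySem.List.slice_to _ h0]
    by_cases hlen : PySem.List.len sel < desired
    · simp only [hlen, if_true]
      exact pvPad_take desired pvEU sel pvEU_nodup
    · have hlenI : ¬ (sel.length : Int) < desired := by
        simpa [PySem.List.len_eq] using hlen
      have hlen' : desired.toNat ≤ sel.length := by omega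
      simp [hlenI, List.take_append, Nat.sub_eq_zero_of_le hlen' ]
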